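-- pv_equiv track=rewrite | github.com/soma-satoro/dies | typeclasses/characters.py | detect_tone
-- ===== SOURCE A (Python) =====
-- def detect_tone(message):
--     """
--     Detect the tone of the message based on punctuation and keywords.
--     """
--     if message.endswith('!'):
--         return "excitedly"
--     elif message.endswith('?'):
--         return "questioningly"
--     elif any(word in message.lower() for word in ['hello', 'hi', 'hey', 'greetings']):
--         return "in greeting"
--     elif any(word in message.lower() for word in ['goodbye', 'bye', 'farewell']):
--         return "in farewell"
--     elif any(word in message.lower() for word in ['please', 'thank', 'thanks']):
--         return "politely"
--     elif any(word in message.lower() for word in ['sorry', 'apologize']):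
--         return "apologetically"
--     else:
--         return None  # No specific tone detected
-- ===== SOURCE B (Python) =====
-- _TONES = ["in greeting", "in farewell", "politely", "apologetically"]
--
-- _KEYWORDS = {
--     'hello': 0, 'hi': 0, 'hey': 0, 'greetings': 0,
--     'goodbye': 1, 'bye': 1, 'farewell': 1,
--     'please': 2, 'thank': 2, 'thanks': 2,
--     'sorry': 3, 'apologize': 3,
-- }
--
-- def detect_tone(message):
--     if message.endswith('!'):
--         return "excitedly"
--     if message.endswith('?'):
--         return "questioningly"
--     low = message.lower()
--     best = None
--     for i in range(len(low)):
--         for kw, rank in _KEYWORDS.items():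
--             if low.startswith(kw, i) and (best is None or rank < best):
--                 best = rank
--     return None if best is None else _TONES[best]
-- ===== Notes on version B (the rewrite author's own statement) =====
-- stated objective: alternative
-- what changed: Instead of a cascade of per-group substring-membership tests, B makes a single left-to-right scan over the positions of the lowered message, matching keyword prefixes at each position and keeping the minimum group rank in an accumulator, then maps that rank to its tone.
import Mathlib
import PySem

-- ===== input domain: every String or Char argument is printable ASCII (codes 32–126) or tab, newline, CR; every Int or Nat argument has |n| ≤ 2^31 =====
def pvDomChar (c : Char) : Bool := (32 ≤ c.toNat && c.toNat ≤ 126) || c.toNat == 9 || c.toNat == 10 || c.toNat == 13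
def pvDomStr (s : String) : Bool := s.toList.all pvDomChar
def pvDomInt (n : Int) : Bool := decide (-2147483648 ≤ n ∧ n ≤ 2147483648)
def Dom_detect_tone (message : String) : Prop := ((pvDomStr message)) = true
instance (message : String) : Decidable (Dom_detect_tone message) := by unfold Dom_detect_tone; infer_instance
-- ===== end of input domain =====

-- B replaces A's per-group substring-test cascade by one left-to-right scan over the
-- positions of the lowered message, keeping the minimum matching keyword rank (objective: alternative).

-- ===== PORT A =====
def detect_tone (message : String) : Option String :=
  if PySem.Str.endswith message "!" then some "excitedly"
  else if PySem.Str.endswith message "?" then some "questioningly"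
  else if ["hello", "hi", "hey", "greetings"].any (fun word => PySem.Str.isIn word (PySem.Str.lower message)) then some "in greeting"
  else if ["goodbye", "bye", "farewell"].any (fun word => PySem.Str.isIn word (PySem.Str.lower message)) then some "in farewell"
  else if ["please", "thank", "thanks"].any (fun word => PySem.Str.isIn word (PySem.Str.lower message)) then some "politely"
  else if ["sorry", "apologize"].any (fun word => PySem.Str.isIn word (PySem.Str.lower message)) then some "apologetically"
  else none

-- ===== PORT B =====
def pvTones : List String := ["in greeting", "in farewell", "politely", "apologetically"]

def pvKeywords : List (List Char × Nat) :=
  [("hello".toList, 0), ("hi".toList, 0), ("hey".toList, 0), ("greetings".toList, 0),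
   ("goodbye".toList, 1), ("bye".toList, 1), ("farewell".toList, 1),
   ("please".toList, 2), ("thank".toList, 2), ("thanks".toList, 2),
   ("sorry".toList, 3), ("apologize".toList, 3)]

-- one inner-loop step: `if low.startswith(kw, i) and (best is None or rank < best): best = rank`
def pvStep (s : List Char) (b : Option Nat) (kr : List Char × Nat) : Option Nat :=
  if kr.1.isPrefixOf s && (match b with | none => true | some v => decide (kr.2 < v)) then
    some kr.2
  else b

-- the inner `for kw, rank in _KEYWORDS.items()` loop at one position (suffix s)
def pvInner (s : List Char) (b : Option Nat) : Option Nat :=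
  pvKeywords.foldl (pvStep s) b

-- the outer `for i in range(len(low))` loop, walking the suffixes left to right
def pvScan : List Char → Option Nat → Option Nat
  | [], best => best
  | c :: rest, best => pvScan rest (pvInner (c :: rest) best)

def detect_tone_alt (message : String) : Option String :=
  if PySem.Str.endswith message "!" then some "excitedly"
  else if PySem.Str.endswith message "?" then some "questioningly"
  else
    match pvScan (PySem.Str.lower message).toList none with
    | none => none
    | some r => some (pvTones.getD r "")

-- ===== PRECONDITION & SPEC =====
def Spec_detect_tone (message : String) (out : Option String) : Prop := out = detect_tone_alt message
instance (message : String) (out : Option String) : Decidable (Spec_detect_tone message out) := by unfold Spec_detect_tone; infer_instance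

-- ===== CLAIM =====
def Claim_equal_detect_tone : Prop := ∀ (message : String), Dom_detect_tone message → Spec_detect_tone message (detect_tone message)

-- ===== LEMMAS AND PROOFS =====

-- min on Option Nat, the shape of the scan's accumulator updates
def pvOmin : Option Nat → Option Nat → Option Nat
  | none, y => y
  | some v, none => some v
  | some v, some w => some (min v w)

theorem pvOmin_none_right (x : Option Nat) : pvOmin x none = x := by
  cases x <;> rfl

theorem pvOmin_assoc (x y z : Option Nat) : pvOmin (pvOmin x y) z = pvOmin x (pvOmin y z) := by
  cases x <;> cases y <;> cases z <;> simp [pvOmin, Nat.min_assoc]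

theorem pvStep_omin (s : List Char) (b : Option Nat) (kr : List Char × Nat) :
    pvStep s b kr = pvOmin b (pvStep s none kr) := by
  cases b with
  | none => simp [pvOmin]
  | some v =>
      simp only [pvStep]
      by_cases hp : kr.1.isPrefixOf s
      · by_cases hlt : kr.2 < v
        · simp [hp, hlt, pvOmin, Nat.min_eq_right (Nat.le_of_lt hlt)]
        · simp [hp, hlt, pvOmin, Nat.min_eq_left (Nat.le_of_not_lt hlt)]
      · simp [hp, pvOmin]

theorem pvFoldl_omin (s : List Char) :
    ∀ (ks : List (List Char × Nat)) (b : Option Nat),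
      ks.foldl (pvStep s) b = pvOmin b (ks.foldl (pvStep s) none) := by
  intro ks
  induction ks with
  | nil => intro b; simp [pvOmin_none_right]
  | cons k ks ih =>
      intro b
      simp only [List.foldl_cons]
      rw [ih (pvStep s b k), ih (pvStep s none k), pvStep_omin s b k, pvOmin_assoc]

theorem pvInner_omin (s : List Char) (b : Option Nat) :
    pvInner s b = pvOmin b (pvInner s none) :=
  pvFoldl_omin s pvKeywords b

theorem pvScan_omin : ∀ (l : List Char) (b : Option Nat),
    pvScan l b = pvOmin b (pvScan l none) := by
  intro l
  induction l with
  | nil => intro b; simp [pvScan, pvOmin_none_right]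
  | cons c rest ih =>
      intro b
      simp only [pvScan]
      rw [ih (pvInner (c :: rest) b), ih (pvInner (c :: rest) none),
          pvInner_omin (c :: rest) b, pvOmin_assoc]

-- a 4-way priority cascade over the group-match booleans
def pvCascade (m0 m1 m2 m3 : Bool) : Option Nat :=
  if m0 then some 0 else if m1 then some 1 else if m2 then some 2 else if m3 then some 3 else none

-- the keywords of rank r
def pvGroup : Nat → List (List Char)
  | 0 => ["hello".toList, "hi".toList, "hey".toList, "greetings".toList]
  | 1 => ["goodbye".toList, "bye".toList, "farewell".toList]
  | 2 => ["please".toList, "thank".toList, "thanks".toList]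
  | _ => ["sorry".toList, "apologize".toList]

-- "some keyword of rank r is a prefix of s"
def pvA (r : Nat) (s : List Char) : Bool :=
  (pvGroup r).any (fun kw => kw.isPrefixOf s)

-- "some keyword of rank r occurs in l"
def pvM (r : Nat) (l : List Char) : Bool :=
  (pvGroup r).any (fun kw => PySem.Chars.isIn kw l)

-- one inner-loop step with its prefix test abstracted to a Bool
def pvE (p : Bool) (r : Nat) (b : Option Nat) : Option Nat :=
  if p && (match b with | none => true | some v => decide (r < v)) then some r else b

theorem pvBoolChain (p1 p2 p3 p4 p5 p6 p7 p8 p9 p10 p11 p12 : Bool) :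
    pvE p12 3 (pvE p11 3 (pvE p10 2 (pvE p9 2 (pvE p8 2 (pvE p7 1 (pvE p6 1 (pvE p5 1
      (pvE p4 0 (pvE p3 0 (pvE p2 0 (pvE p1 0 none))))))))))) =
    (if p1 || (p2 || (p3 || (p4 || false))) then some 0
     else if p5 || (p6 || (p7 || false)) then some 1
     else if p8 || (p9 || (p10 || false)) then some 2
     else if p11 || (p12 || false) then some 3
     else none) := by
  revert p1 p2 p3 p4 p5 p6 p7 p8 p9 p10 p11 p12; decide

theorem pvInner_cascade (s : List Char) :
    pvInner s none = pvCascade (pvA 0 s) (pvA 1 s) (pvA 2 s) (pvA 3 s) := by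
  have h := pvBoolChain ("hello".toList.isPrefixOf s) ("hi".toList.isPrefixOf s)
    ("hey".toList.isPrefixOf s) ("greetings".toList.isPrefixOf s)
    ("goodbye".toList.isPrefixOf s) ("bye".toList.isPrefixOf s) ("farewell".toList.isPrefixOf s)
    ("please".toList.isPrefixOf s) ("thank".toList.isPrefixOf s) ("thanks".toList.isPrefixOf s)
    ("sorry".toList.isPrefixOf s) ("apologize".toList.isPrefixOf s)
  have lhs : pvInner s none =
      pvE ("apologize".toList.isPrefixOf s) 3 (pvE ("sorry".toList.isPrefixOf s) 3
        (pvE ("thanks".toList.isPrefixOf s) 2 (pvE ("thank".toList.isPrefixOf s) 2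
        (pvE ("please".toList.isPrefixOf s) 2 (pvE ("farewell".toList.isPrefixOf s) 1
        (pvE ("bye".toList.isPrefixOf s) 1 (pvE ("goodbye".toList.isPrefixOf s) 1
        (pvE ("greetings".toList.isPrefixOf s) 0 (pvE ("hey".toList.isPrefixOf s) 0
        (pvE ("hi".toList.isPrefixOf s) 0 (pvE ("hello".toList.isPrefixOf s) 0 none))))))))))) := rfl
  rw [lhs, h]
  simp [pvCascade, pvA, pvGroup]

theorem pvOmin_cascade (a0 a1 a2 a3 m0 m1 m2 m3 : Bool) :
    pvOmin (pvCascade a0 a1 a2 a3) (pvCascade m0 m1 m2 m3) =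
    pvCascade (a0 || m0) (a1 || m1) (a2 || m2) (a3 || m3) := by
  revert a0 a1 a2 a3 m0 m1 m2 m3; decide

theorem pvIsIn_cons (kw : List Char) (c : Char) (rest : List Char) :
    PySem.Chars.isIn kw (c :: rest) = (kw.isPrefixOf (c :: rest) || PySem.Chars.isIn kw rest) := by
  rcases h : PySem.Chars.isIn kw (c :: rest) with _ | _
  · rw [PySem.Chars.isIn_eq_false_iff] at h
    have h1 : kw.isPrefixOf (c :: rest) = false :=
      Bool.eq_false_iff.mpr (fun hb => h (List.isPrefixOf_iff_prefix.mp hb).isInfix)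
    have h2 : PySem.Chars.isIn kw rest = false := by
      rw [PySem.Chars.isIn_eq_false_iff]
      exact fun hi => h (hi.trans (List.suffix_cons c rest).isInfix)
    rw [h1, h2]; rfl
  · rw [PySem.Chars.isIn_iff_infix, List.infix_cons_iff] at h
    rcases h with h | h
    · rw [List.isPrefixOf_iff_prefix.mpr h, Bool.true_or]
    · rw [(PySem.Chars.isIn_iff_infix kw rest).mpr h, Bool.or_true]

theorem pvM_cons (r : Nat) (c : Char) (rest : List Char) :
    pvM r (c :: rest) = (pvA r (c :: rest) || pvM r rest) := by
  have key : ∀ kws : List (List Char),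
      kws.any (fun kw => PySem.Chars.isIn kw (c :: rest)) =
      (kws.any (fun kw => kw.isPrefixOf (c :: rest)) || kws.any (fun kw => PySem.Chars.isIn kw rest)) := by
    intro kws
    induction kws with
    | nil => rfl
    | cons kw kws ih =>
        rw [List.any_cons, List.any_cons, List.any_cons, ih, pvIsIn_cons]
        cases kw.isPrefixOf (c :: rest) <;> cases PySem.Chars.isIn kw rest <;> simp
  simp only [pvM, pvA, key]

theorem pvScan_cascade : ∀ (l : List Char),
    pvScan l none = pvCascade (pvM 0 l) (pvM 1 l) (pvM 2 l) (pvM 3 l) := by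
  intro l
  induction l with
  | nil => decide
  | cons c rest ih =>
      simp only [pvScan]
      rw [pvScan_omin, ih, pvInner_cascade, pvOmin_cascade,
          ← pvM_cons 0, ← pvM_cons 1, ← pvM_cons 2, ← pvM_cons 3]

-- ===== VERDICT =====
theorem detect_tone_spec : Claim_equal_detect_tone := by
  intro message _
  unfold Spec_detect_tone detect_tone detect_tone_alt
  simp only [PySem.Str.endswith_eq, PySem.Str.isIn_eq, PySem.Str.toList_lower,
             List.any_cons, List.any_nil, pvScan_cascade]
  by_cases e1 : PySem.Chars.endswith message.toList ['!'] = true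
  · simp [e1]
  · by_cases e2 : PySem.Chars.endswith message.toList ['?'] = true
    · simp [e1, e2]
    · by_cases m0 : pvM 0 (PySem.Chars.lower message.toList) = true <;>
      by_cases m1 : pvM 1 (PySem.Chars.lower message.toList) = true <;>
      by_cases m2 : pvM 2 (PySem.Chars.lower message.toList) = true <;>
      by_cases m3 : pvM 3 (PySem.Chars.lower message.toList) = true <;>
        simp_all [pvM, pvGroup, pvCascade, pvTones, List.any_cons, List.any_nil]
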